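-- pv_equiv track=rewrite | github.com/wonyoung-jang/logseq-analyzer | src/namespace.py | detect_non_namespace_conflicts
-- ===== SOURCE A (Python) =====
-- from collections import Counter, defaultdict
-- from typing import Any, Dict, List, Set, Tuple
--
-- def detect_non_namespace_conflicts(
--     namespace_parts: Dict[str, Dict[str, int]], non_namespace: Set[str], dangling: List[str]
-- ) -> Dict[str, List[str]]:
--     """
--     Check for conflicts between split namespace parts and existing non-namespace page names.
--
--     Args:
--         namespace_parts (dict): Dictionary mapping entry names to their namespace parts.
--         non_namespace (set): Set of names from non-namespace pages.
--         dangling (list): List of dangling links.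
--
--     Returns:
--         dict: Mapping of conflicting namespace parts to a list of entry names where the conflict occurs.
--     """
--     conflicts_non_namespace = defaultdict(list)
--     conflicts_dangling = defaultdict(list)
--     for entry, parts in namespace_parts.items():
--         for part in parts.keys():
--             if part in non_namespace:
--                 conflicts_non_namespace[part].append(entry)
--
--             if part in dangling:
--                 conflicts_dangling[part].append(entry)
--
--     return conflicts_non_namespace, conflicts_dangling
-- ===== SOURCE B (Python) =====
-- from collections import defaultdict
--
--
-- def detect_non_namespace_conflicts(namespace_parts, non_namespace, dangling):
--     # Build a full inverted index part -> [entries containing it], then filter it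
--     # once per conflict kind, instead of testing memberships inside the scan.
--     index = defaultdict(list)
--     for entry, parts in namespace_parts.items():
--         for part in parts.keys():
--             index[part].append(entry)
--
--     conflicts_non_namespace = defaultdict(list)
--     for part, entries in index.items():
--         if part in non_namespace:
--             conflicts_non_namespace[part] = list(entries)
--
--     conflicts_dangling = defaultdict(list)
--     for part, entries in index.items():
--         if part in dangling:
--             conflicts_dangling[part] = list(entries)
--
--     return conflicts_non_namespace, conflicts_dangling
-- ===== Notes on version B (the rewrite author's own statement) =====
-- stated objective: alternative
-- what changed: B replaces A's single scan that tests both memberships inside the inner loop by a build-then-filter decomposition: it first builds a complete inverted index part -> list of entries with an unconditional nested loop, then derives each conflict dict by a separate filtering pass over the index.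
import Mathlib
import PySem

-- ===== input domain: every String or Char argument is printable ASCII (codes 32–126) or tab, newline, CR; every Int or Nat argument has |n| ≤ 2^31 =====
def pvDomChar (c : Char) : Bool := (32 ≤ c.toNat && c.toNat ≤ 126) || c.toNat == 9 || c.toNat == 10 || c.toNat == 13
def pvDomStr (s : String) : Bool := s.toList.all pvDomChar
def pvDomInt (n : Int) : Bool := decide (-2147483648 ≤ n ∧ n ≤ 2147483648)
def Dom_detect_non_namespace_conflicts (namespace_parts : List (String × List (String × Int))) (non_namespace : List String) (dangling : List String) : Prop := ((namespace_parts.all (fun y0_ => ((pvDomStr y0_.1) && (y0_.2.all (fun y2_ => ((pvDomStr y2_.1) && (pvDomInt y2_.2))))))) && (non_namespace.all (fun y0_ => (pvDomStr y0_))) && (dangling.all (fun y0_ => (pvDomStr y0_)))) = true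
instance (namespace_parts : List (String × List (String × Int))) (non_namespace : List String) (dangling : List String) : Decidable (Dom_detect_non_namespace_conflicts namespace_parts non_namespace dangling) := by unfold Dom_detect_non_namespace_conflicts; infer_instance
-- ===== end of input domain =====

-- B builds a full inverted index part -> entries, then filters it per conflict kind; A tests memberships inside the scan (alternative decomposition, same results).


-- ===== PORT A =====
def detect_non_namespace_conflicts (namespace_parts : List (String × List (String × Int))) (non_namespace : List String) (dangling : List String) : (List (String × List String)) × (List (String × List String)) :=
  let st := (PySem.Dict.ofList namespace_parts).items.foldl
    (fun (st : PySem.Dict String (List String) × PySem.Dict String (List String)) ep =>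
      (PySem.Dict.ofList ep.2).keys.foldl
        (fun st part =>
          (if part ∈ non_namespace then st.1.modify part [] (fun l => l ++ [ep.1]) else st.1,
           if part ∈ dangling then st.2.modify part [] (fun l => l ++ [ep.1]) else st.2))
        st)
    (PySem.Dict.empty, PySem.Dict.empty)
  (st.1.items, st.2.items)

-- ===== PORT B =====
def detect_non_namespace_conflicts_alt (namespace_parts : List (String × List (String × Int))) (non_namespace : List String) (dangling : List String) : (List (String × List String)) × (List (String × List String)) :=
  let index := (PySem.Dict.ofList namespace_parts).items.foldl
    (fun (d : PySem.Dict String (List String)) ep =>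
      (PySem.Dict.ofList ep.2).keys.foldl (fun d part => d.modify part [] (fun l => l ++ [ep.1])) d)
    PySem.Dict.empty
  let cn := index.items.foldl
    (fun (d : PySem.Dict String (List String)) p => if p.1 ∈ non_namespace then d.insert p.1 p.2 else d)
    PySem.Dict.empty
  let cd := index.items.foldl
    (fun (d : PySem.Dict String (List String)) p => if p.1 ∈ dangling then d.insert p.1 p.2 else d)
    PySem.Dict.empty
  (cn.items, cd.items)

-- ===== PRECONDITION & SPEC =====
def Spec_detect_non_namespace_conflicts (namespace_parts : List (String × List (String × Int))) (non_namespace : List String) (dangling : List String) (out : (List (String × List String)) × (List (String × List String))) : Prop := out = detect_non_namespace_conflicts_alt namespace_parts non_namespace dangling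
instance (namespace_parts : List (String × List (String × Int))) (non_namespace : List String) (dangling : List String) (out : (List (String × List String)) × (List (String × List String))) : Decidable (Spec_detect_non_namespace_conflicts namespace_parts non_namespace dangling out) := by unfold Spec_detect_non_namespace_conflicts; infer_instance

-- ===== CLAIM (what is proved, stated in full; the proofs are below) =====
def Claim_equal_detect_non_namespace_conflicts : Prop := ∀ (namespace_parts : List (String × List (String × Int))) (non_namespace : List String) (dangling : List String), Dom_detect_non_namespace_conflicts namespace_parts non_namespace dangling → Spec_detect_non_namespace_conflicts namespace_parts non_namespace dangling (detect_non_namespace_conflicts namespace_parts non_namespace dangling)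

-- ===== LEMMAS AND PROOFS =====

-- filter commutes with Set.add (one step of dedup), generalized over the accumulator
theorem pvFoldlAdd_filter (p : String → Bool) (l acc : List String) :
    List.foldl PySem.Set.add (acc.filter p) (l.filter p) = (List.foldl PySem.Set.add acc l).filter p := by
  induction l generalizing acc with
  | nil => rfl
  | cons a t ih =>
    by_cases h : p a
    · have hstep : PySem.Set.add (List.filter p acc) a = List.filter p (PySem.Set.add acc a) := by
        by_cases hm : a ∈ acc
        · simp [PySem.Set.add, List.mem_filter, hm, h]
        · simp [PySem.Set.add, List.mem_filter, hm, h]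
      simp [h, ← ih, hstep]
    · have hstep : List.filter p (PySem.Set.add acc a) = List.filter p acc := by
        by_cases hm : a ∈ acc <;> simp [PySem.Set.add, hm, h]
      simp [h, ← ih, hstep]

-- dedup (first occurrences) commutes with filter
theorem pvSet_ofList_filter (p : String → Bool) (l : List String) :
    PySem.Set.ofList (l.filter p) = (PySem.Set.ofList l).filter p := by
  have := pvFoldlAdd_filter p l []
  simpa [PySem.Set.ofList, PySem.Set.empty] using this

-- core equivalence: filtering a full inverted index equals building the index only on passing pairs
theorem pvMain (ps : List (String × String)) (mem : String → Prop) [DecidablePred mem] :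
    ((ps.foldl (fun d q => d.modify q.1 [] (fun l => l ++ [q.2])) PySem.Dict.empty).items.foldl
       (fun (d : PySem.Dict String (List String)) q => if mem q.1 then d.insert q.1 q.2 else d)
       PySem.Dict.empty).items
    = (ps.foldl (fun (d : PySem.Dict String (List String)) q =>
         if mem q.1 then d.modify q.1 [] (fun l => l ++ [q.2]) else d) PySem.Dict.empty).items := by
  set idx := ps.foldl (fun (d : PySem.Dict String (List String)) q =>
      d.modify q.1 [] (fun l => l ++ [q.2])) PySem.Dict.empty with hidx
  have hnd : idx.keys.Nodup := by
    rw [hidx]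
    exact PySem.Dict.nodup_keys_foldl_modify_key ps Prod.fst [] (fun d q => fun l => l ++ [q.2]) _
      (by simp [pysem])
  have hkeys : idx.keys = PySem.Set.ofList (ps.map Prod.fst) := by
    rw [hidx, PySem.Dict.keys_foldl_modify_key ps Prod.fst [] (fun d q => fun l => l ++ [q.2])]
    simp [pysem, PySem.Set.update_nil_left]
  have hval : ∀ c, idx.getD c [] = (ps.filter (fun q => q.1 == c)).map (fun q => q.2) := by
    intro c
    rw [hidx, PySem.Dict.getD_foldl_modify_append]
    simp [pysem]
  -- left side: the filtering pass keeps exactly the passing items of the index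
  have hL : (idx.items.foldl
       (fun (d : PySem.Dict String (List String)) q => if mem q.1 then d.insert q.1 q.2 else d)
       PySem.Dict.empty).items
      = idx.items.filter (fun q => decide (mem q.1)) := by
    have h1 : idx.items.foldl
        (fun (d : PySem.Dict String (List String)) q => if mem q.1 then d.insert q.1 q.2 else d)
        PySem.Dict.empty
        = (idx.items.filter (fun q => decide (mem q.1))).foldl
            (fun (d : PySem.Dict String (List String)) q => d.insert q.1 q.2) PySem.Dict.empty := by
      rw [List.foldl_filter]
      simp only [decide_eq_true_eq]
    have hmapfst : (idx.items.filter (fun q => decide (mem q.1))).map Prod.fst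
        = idx.keys.filter (fun k => decide (mem k)) := by
      have := List.filter_map (f := (Prod.fst : String × List String → String))
        (p := fun k => decide (mem k)) (l := idx.items)
      simpa [PySem.Dict.keys, Function.comp] using this.symm
    have hfnd : ((idx.items.filter (fun q => decide (mem q.1))).map Prod.fst).Nodup := by
      rw [hmapfst]; exact hnd.filter _
    rw [h1, PySem.Dict.items_foldl_insert_fresh _ Prod.fst Prod.snd _ (by simp [pysem]) hfnd]
    simp [PySem.Dict.empty]
  rw [hL]
  -- right side: the conditional build is the build over the filtered pairs
  have hR : ps.foldl (fun (d : PySem.Dict String (List String)) q =>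
        if mem q.1 then d.modify q.1 [] (fun l => l ++ [q.2]) else d) PySem.Dict.empty
      = (ps.filter (fun q => decide (mem q.1))).foldl
          (fun (d : PySem.Dict String (List String)) q => d.modify q.1 [] (fun l => l ++ [q.2]))
          PySem.Dict.empty := by
    rw [List.foldl_filter]
    simp only [decide_eq_true_eq]
  rw [hR]
  set qs := ps.filter (fun q => decide (mem q.1)) with hqs
  set M := qs.foldl (fun (d : PySem.Dict String (List String)) q =>
      d.modify q.1 [] (fun l => l ++ [q.2])) PySem.Dict.empty with hM
  have hndM : M.keys.Nodup := by
    rw [hM]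
    exact PySem.Dict.nodup_keys_foldl_modify_key qs Prod.fst [] (fun d q => fun l => l ++ [q.2]) _
      (by simp [pysem])
  have hkeysM : M.keys = idx.keys.filter (fun k => decide (mem k)) := by
    rw [hM, PySem.Dict.keys_foldl_modify_key qs Prod.fst [] (fun d q => fun l => l ++ [q.2])]
    have h2 : qs.map Prod.fst = (ps.map Prod.fst).filter (fun k => decide (mem k)) := by
      rw [hqs]
      have := List.filter_map (f := (Prod.fst : String × String → String))
        (p := fun k => decide (mem k)) (l := ps)
      simpa [Function.comp] using this.symm
    simp [pysem, PySem.Set.update_nil_left, h2, pvSet_ofList_filter, hkeys]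
  have hvalM : ∀ c, mem c → M.getD c [] = (ps.filter (fun q => q.1 == c)).map (fun q => q.2) := by
    intro c hc
    rw [hM, PySem.Dict.getD_foldl_modify_append]
    have h3 : qs.filter (fun q => q.1 == c) = ps.filter (fun q => q.1 == c) := by
      rw [hqs, List.filter_filter]
      refine List.filter_congr ?_
      intro q _
      by_cases hqc : q.1 = c
      · simp [hqc, hc]
      · simp [hqc]
    simp [pysem, h3]
  rw [PySem.Dict.items_eq_map_keys idx hnd [], PySem.Dict.items_eq_map_keys M hndM []]
  have h4 : (idx.keys.map (fun k => (k, idx.getD k []))).filter (fun q => decide (mem q.1))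
      = (idx.keys.filter (fun k => decide (mem k))).map (fun k => (k, idx.getD k [])) := by
    have := List.filter_map (f := fun k => (k, idx.getD k []))
      (p := fun q => decide (mem q.1)) (l := idx.keys)
    simpa [Function.comp] using this
  rw [h4, hkeysM]
  refine List.map_congr_left ?_
  intro k hk
  have hmemk : mem k := by
    simp only [List.mem_filter, decide_eq_true_eq] at hk
    exact hk.2
  rw [hval k, hvalM k hmemk]

-- splitting the paired-state loop of A into two independent loops
theorem pvSplit (F G : PySem.Dict String (List String) → (String × List (String × Int)) → String → PySem.Dict String (List String))
    (l : List (String × List (String × Int))) (ab : PySem.Dict String (List String) × PySem.Dict String (List String)) :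
    l.foldl (fun st ep => (PySem.Dict.ofList ep.2).keys.foldl
        (fun st part => (F st.1 ep part, G st.2 ep part)) st) ab
    = (l.foldl (fun d ep => (PySem.Dict.ofList ep.2).keys.foldl (fun d part => F d ep part) d) ab.1,
       l.foldl (fun d ep => (PySem.Dict.ofList ep.2).keys.foldl (fun d part => G d ep part) d) ab.2) := by
  induction l generalizing ab with
  | nil => rfl
  | cons ep t ih =>
    obtain ⟨a, b⟩ := ab
    simp only [List.foldl_cons]
    rw [PySem.List.foldl_prod_mk (fun d part => F d ep part) (fun d part => G d ep part), ih]

-- flattening the nested entry/part loop into one loop over (part, entry) pairs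
theorem pvFlat (g : PySem.Dict String (List String) → (String × String) → PySem.Dict String (List String))
    (l : List (String × List (String × Int))) (init : PySem.Dict String (List String)) :
    l.foldl (fun d ep => (PySem.Dict.ofList ep.2).keys.foldl (fun d part => g d (part, ep.1)) d) init
    = (l.flatMap (fun ep => (PySem.Dict.ofList ep.2).keys.map (fun part => (part, ep.1)))).foldl g init := by
  rw [List.foldl_flatMap]
  simp only [List.foldl_map]

-- ===== VERDICT (by name: the statement is the Claim_ definition above) =====
theorem detect_non_namespace_conflicts_spec : Claim_equal_detect_non_namespace_conflicts := by
  intro namespace_parts non_namespace dangling _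
  show detect_non_namespace_conflicts namespace_parts non_namespace dangling
      = detect_non_namespace_conflicts_alt namespace_parts non_namespace dangling
  unfold detect_non_namespace_conflicts detect_non_namespace_conflicts_alt
  rw [pvSplit (fun d ep part => if part ∈ non_namespace then d.modify part [] (fun l => l ++ [ep.1]) else d)
      (fun d ep part => if part ∈ dangling then d.modify part [] (fun l => l ++ [ep.1]) else d)]
  rw [pvFlat (fun d q => if q.1 ∈ non_namespace then d.modify q.1 [] (fun l => l ++ [q.2]) else d),
      pvFlat (fun d q => if q.1 ∈ dangling then d.modify q.1 [] (fun l => l ++ [q.2]) else d),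
      pvFlat (fun d q => d.modify q.1 [] (fun l => l ++ [q.2]))]
  exact Prod.ext
    (pvMain _ (fun s => s ∈ non_namespace)).symm
    (pvMain _ (fun s => s ∈ dangling)).symm
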